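-- pv_equiv track=rewrite | github.com/GhengisPliskin/IL-2-Great-Battles-Modular-Mission-Orchestrator | scripts/fix_prompt_headers.py | add_ground_rule_8
-- ===== SOURCE A (Python) =====
-- def add_ground_rule_8(content):
--     """Add Ground Rule 8 notice to Context sections that reference FMEA/Spec constraints."""
--     # Find blockquotes in Context sections that mention "Relevant" specs/FMEA
--     # Add Ground Rule 8 notice if not already present
--
--     if '**Ground Rule 8 applies**' in content:
--         return content  # Already has it somewhere
--
--     # Find patterns like "> **Relevant MMF Spec" or "> **Relevant Specs"
--     # and add Ground Rule 8 after the blockquote block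
--
--     lines = content.split('\n')
--     new_lines = []
--     i = 0
--     while i < len(lines):
--         new_lines.append(lines[i])
--
--         # Check if this starts a "Relevant Specs" blockquote
--         if lines[i].startswith('> **Relevant') and ('Spec' in lines[i] or 'FMEA' in lines[i]):
--             # Scan to end of blockquote
--             i += 1
--             while i < len(lines) and lines[i].startswith('>'):
--                 new_lines.append(lines[i])
--                 i += 1
--
--             # Add Ground Rule 8 notice
--             new_lines.append('>')
--             new_lines.append('> **Ground Rule 8 applies:** These constraints are immutable during execution.')
--             new_lines.append('> If a constraint is logically impossible, HALT and invoke Ground Rule 9.')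
--             continue
--
--         i += 1
--
--     return '\n'.join(new_lines)
-- ===== SOURCE B (Python) =====
-- NOTICE = [
--     '>',
--     '> **Ground Rule 8 applies:** These constraints are immutable during execution.',
--     '> If a constraint is logically impossible, HALT and invoke Ground Rule 9.',
-- ]
--
--
-- def _is_trigger(line):
--     return line.startswith('> **Relevant') and ('Spec' in line or 'FMEA' in line)
--
--
-- def _block_end(lines, k):
--     """Index just past the blockquote that starts at trigger line k."""
--     end = k + 1
--     while end < len(lines) and lines[end].startswith('>'):
--         end += 1
--     return end
--
--
-- def _insert(lines):
--     """Find the first trigger line; splice the notice after its blockquote and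
--     recurse on the untouched suffix."""
--     k = next((i for i, l in enumerate(lines) if _is_trigger(l)), None)
--     if k is None:
--         return lines
--     end = _block_end(lines, k)
--     return lines[:end] + NOTICE + _insert(lines[end:])
--
--
-- def add_ground_rule_8(content):
--     """Add Ground Rule 8 notice to Context sections that reference FMEA/Spec constraints."""
--     if '**Ground Rule 8 applies**' in content:
--         return content  # Already has it somewhere
--     return '\n'.join(_insert(content.split('\n')))
-- ===== Notes on version B (the rewrite author's own statement) =====
-- stated objective: alternative
-- what changed: A's index-driven while loop that appends line by line into an accumulator (with a nested scan copying each blockquote) is replaced by a recursive find-and-splice: locate the first trigger line, slice the list at the end of its blockquote, concatenate prefix + notice + recursive result on the untouched suffix.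
import Mathlib
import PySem

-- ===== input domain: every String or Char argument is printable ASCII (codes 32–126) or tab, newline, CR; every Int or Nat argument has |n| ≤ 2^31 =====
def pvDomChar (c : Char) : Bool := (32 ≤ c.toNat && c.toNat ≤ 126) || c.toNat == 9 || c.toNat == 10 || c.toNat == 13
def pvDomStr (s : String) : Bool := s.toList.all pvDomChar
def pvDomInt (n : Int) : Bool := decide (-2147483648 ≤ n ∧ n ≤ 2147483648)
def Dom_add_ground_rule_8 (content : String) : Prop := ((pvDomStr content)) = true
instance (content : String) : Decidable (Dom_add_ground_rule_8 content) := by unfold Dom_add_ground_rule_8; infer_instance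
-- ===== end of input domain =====

-- B replaces A's accumulator-driven while loop (with nested blockquote copy) by a
-- recursive find-and-splice over list slices (objective: alternative decomposition).

-- the three notice lines appended after a relevant blockquote (shared literal text)
def pvNotice : List String :=
  [">",
   "> **Ground Rule 8 applies:** These constraints are immutable during execution.",
   "> If a constraint is logically impossible, HALT and invoke Ground Rule 9."]

-- the trigger test: line startswith '> **Relevant' and ('Spec' in line or 'FMEA' in line)
def pvTrigger (l : String) : Bool :=
  PySem.Str.startswith l "> **Relevant" && (PySem.Str.isIn "Spec" l || PySem.Str.isIn "FMEA" l)

-- ===== PORT A =====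
-- inner while: consume '>' lines into new_lines, return (consumed block, remaining lines)
def pvScanA : List String → List String × List String
  | [] => ([], [])
  | l :: rest =>
      if PySem.Str.startswith l ">" then
        let (b, r) := pvScanA rest
        (l :: b, r)
      else ([], l :: rest)

theorem pvScanA_len : ∀ ls : List String, (pvScanA ls).2.length ≤ ls.length := by
  intro ls
  induction ls with
  | nil => simp [pvScanA]
  | cons l rest ih =>
      simp only [pvScanA]
      split
      · simpa using Nat.le_succ_of_le ih
      · simp

-- outer while loop of A
def pvLoopA : List String → List String
  | [] => []
  | l :: rest =>
      if pvTrigger l then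
        let p := pvScanA rest
        l :: (p.1 ++ pvNotice ++ pvLoopA p.2)
      else l :: pvLoopA rest
termination_by ls => ls.length
decreasing_by
  · exact Nat.lt_succ_of_le (pvScanA_len rest)
  · simp

def add_ground_rule_8 (content : String) : String :=
  if PySem.Str.isIn "**Ground Rule 8 applies**" content then content
  else PySem.Str.join "\n" (pvLoopA ((PySem.Str.split? content "\n").getD []))

-- ===== PORT B =====
-- _block_end: how many leading '>' lines follow the trigger (end - (k+1) of the Python while)
def pvBlockLen : List String → Nat
  | [] => 0
  | l :: rest => if PySem.Str.startswith l ">" then pvBlockLen rest + 1 else 0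

-- _insert: find the first trigger, splice the notice after its blockquote, recurse on the suffix
def pvInsertB (lines : List String) : List String :=
  match h : List.findIdx? pvTrigger lines with
  | none => lines
  | some k =>
      let e := k + 1 + pvBlockLen (lines.drop (k + 1))
      lines.take e ++ pvNotice ++ pvInsertB (lines.drop e)
termination_by lines.length
decreasing_by
  have hk : k < lines.length := (List.findIdx?_eq_some_iff_findIdx_eq.mp h).1
  simp only [List.length_drop]
  omega

def add_ground_rule_8_alt (content : String) : String :=
  if PySem.Str.isIn "**Ground Rule 8 applies**" content then content
  else PySem.Str.join "\n" (pvInsertB ((PySem.Str.split? content "\n").getD []))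

-- ===== PRECONDITION & SPEC =====
def Spec_add_ground_rule_8 (content : String) (out : String) : Prop := out = add_ground_rule_8_alt content
instance (content : String) (out : String) : Decidable (Spec_add_ground_rule_8 content out) := by unfold Spec_add_ground_rule_8; infer_instance

-- ===== CLAIM (what is proved, stated in full; the proofs are below) =====
def Claim_equal_add_ground_rule_8 : Prop := ∀ (content : String), Dom_add_ground_rule_8 content → Spec_add_ground_rule_8 content (add_ground_rule_8 content)

-- ===== LEMMAS AND PROOFS =====

-- unfold pvInsertB when no trigger is present
theorem pvInsertB_none (ls : List String) (hf : List.findIdx? pvTrigger ls = none) :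
    pvInsertB ls = ls := by
  rw [pvInsertB]
  split
  · rfl
  · next k heq => rw [hf] at heq; exact absurd heq (by simp)

-- unfold pvInsertB when the first trigger is at index k
theorem pvInsertB_some (ls : List String) (k : Nat)
    (hf : List.findIdx? pvTrigger ls = some k) :
    pvInsertB ls =
      ls.take (k + 1 + pvBlockLen (ls.drop (k + 1))) ++ pvNotice ++
        pvInsertB (ls.drop (k + 1 + pvBlockLen (ls.drop (k + 1)))) := by
  rw [pvInsertB]
  split
  · next heq => rw [hf] at heq; exact absurd heq (by simp)
  · next k' heq =>
      rw [hf] at heq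
      cases heq
      rfl

-- A's inner scan is take/drop at the blockquote length
theorem pvScanA_eq (ls : List String) :
    pvScanA ls = (ls.take (pvBlockLen ls), ls.drop (pvBlockLen ls)) := by
  induction ls with
  | nil => simp [pvScanA, pvBlockLen]
  | cons l rest ih =>
      by_cases h : PySem.Chars.startswith l.toList ['>'] = true
      · simp [pvScanA, pvBlockLen, PySem.Str.startswith, h, ih]
      · simp [pvScanA, pvBlockLen, PySem.Str.startswith, h]

-- pushing a non-trigger head through B's recursion
theorem pvInsertB_cons_not (l : String) (rest : List String) (h : ¬ pvTrigger l = true) :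
    pvInsertB (l :: rest) = l :: pvInsertB rest := by
  cases hf : List.findIdx? pvTrigger rest with
  | none =>
      have hc : List.findIdx? pvTrigger (l :: rest) = none := by
        rw [List.findIdx?_cons]
        simp [h, hf]
      rw [pvInsertB_none _ hc, pvInsertB_none _ hf]
  | some k =>
      have hc : List.findIdx? pvTrigger (l :: rest) = some (k + 1) := by
        rw [List.findIdx?_cons]
        simp [h, hf]
      rw [pvInsertB_some _ _ hc, pvInsertB_some _ _ hf]
      have hdrop : (l :: rest).drop (k + 1 + 1) = rest.drop (k + 1) := by simp
      have harr : k + 1 + 1 + pvBlockLen (rest.drop (k + 1)) =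
          (k + 1 + pvBlockLen (rest.drop (k + 1))) + 1 := by omega
      rw [hdrop, harr, List.take_succ_cons, List.drop_succ_cons, List.cons_append, List.cons_append]

-- trigger head: B splices exactly where A's inner scan stops
theorem pvInsertB_cons_trig (l : String) (rest : List String) (h : pvTrigger l = true) :
    pvInsertB (l :: rest) =
      l :: (rest.take (pvBlockLen rest) ++ pvNotice ++ pvInsertB (rest.drop (pvBlockLen rest))) := by
  have hc : List.findIdx? pvTrigger (l :: rest) = some 0 := by
    rw [List.findIdx?_cons]; simp [h]
  rw [pvInsertB_some _ _ hc]
  have harr : 0 + 1 + pvBlockLen ((l :: rest).drop (0 + 1)) = pvBlockLen rest + 1 := by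
    simp; omega
  rw [harr, List.take_succ_cons, List.drop_succ_cons, List.cons_append, List.cons_append]

-- the two implementations produce the same line list
theorem pvLoop_eq (ls : List String) : pvLoopA ls = pvInsertB ls := by
  induction ls using pvLoopA.induct with
  | case1 => rw [pvLoopA, pvInsertB_none _ (by simp)]
  | case2 l rest h p ih =>
      rw [pvLoopA, if_pos h]
      simp only [p, pvScanA_eq] at ih ⊢
      rw [pvInsertB_cons_trig l rest h, ih]
  | case3 l rest h ih =>
      rw [pvLoopA, if_neg h, pvInsertB_cons_not l rest h, ih]

-- ===== VERDICT (by name: the statement is the Claim_ definition above) =====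
theorem add_ground_rule_8_spec : Claim_equal_add_ground_rule_8 := by
  intro content _
  unfold Spec_add_ground_rule_8 add_ground_rule_8 add_ground_rule_8_alt
  rw [pvLoop_eq]
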